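-- pv_equiv track=rewrite | github.com/iks15174/study | programmers/110옮기기.py | extract_x
-- ===== SOURCE A (Python) =====
-- def extract_x(s_el):
--     x_num = 0
--     new_s_el = []
--     for sidx, s in enumerate(s_el):
--         new_s_el.append(s)
--         if len(new_s_el) < 3:
--             continue
--         if "".join(new_s_el[-3 : ]) == "110":
--             x_num += 1
--             for _ in range(3):
--                 new_s_el.pop()
--     return ("".join(new_s_el), x_num)
-- ===== SOURCE B (Python) =====
-- def find110(cur):
--     for i in range(len(cur) - 2):
--         if cur[i] + cur[i + 1] + cur[i + 2] == "110":
--             return i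
--     return None
--
--
-- def extract_x(s_el):
--     cur = list(s_el)
--     x_num = 0
--     while True:
--         i = find110(cur)
--         if i is None:
--             return ("".join(cur), x_num)
--         del cur[i : i + 3]
--         x_num += 1
-- ===== Notes on version B (the rewrite author's own statement) =====
-- stated objective: alternative
-- what changed: B replaces A's single left-to-right stack pass by repeated whole-list scans that delete the leftmost adjacent triple of elements joining to '110' until none remains (a rewrite-to-fixpoint); equality rests on the leftmost-deletion strategy computing the same normal form as the stack reduction.
import Mathlib
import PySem

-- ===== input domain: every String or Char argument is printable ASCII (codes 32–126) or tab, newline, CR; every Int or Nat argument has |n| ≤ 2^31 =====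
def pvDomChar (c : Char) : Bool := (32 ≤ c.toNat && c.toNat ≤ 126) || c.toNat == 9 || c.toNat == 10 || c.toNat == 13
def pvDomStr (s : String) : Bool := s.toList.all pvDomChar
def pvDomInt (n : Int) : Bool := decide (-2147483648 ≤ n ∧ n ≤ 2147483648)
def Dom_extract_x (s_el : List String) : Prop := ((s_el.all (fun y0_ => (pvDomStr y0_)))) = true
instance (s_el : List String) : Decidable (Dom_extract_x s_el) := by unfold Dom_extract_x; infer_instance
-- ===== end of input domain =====

-- B replaces A's single stack pass by repeated scan-and-delete of the leftmost
-- adjacent triple joining to "110" until none remains (objective: alternative).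

-- ===== PORT A =====
-- one iteration of A's for-loop body (state: (new_s_el, x_num))
def extract_x_step (st : List String × Int) (s : String) : List String × Int :=
  let new := st.1 ++ [s]
  if new.length < 3 then (new, st.2)
  else if PySem.Str.join "" (PySem.List.slice new (some (-3)) none) == "110" then
    -- for _ in range(3): new_s_el.pop()   (pop on a nonempty list; getD guard only for totality)
    ((PySem.List.pyRange 0 3 1).foldl
        (fun l _ => ((PySem.List.pop? l (-1)).map Prod.snd).getD l) new, st.2 + 1)
  else (new, st.2)

def extract_x (s_el : List String) : String × Int :=
  let r := s_el.foldl extract_x_step ([], 0)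
  (PySem.Str.join "" r.1, r.2)

-- ===== PORT B =====
-- find110: B's index scan for the first i with cur[i]+cur[i+1]+cur[i+2] == "110",
-- as the obvious sliding-window recursion over the same comparisons in the same order
def find110 (cur : List String) : Option Nat :=
  match cur with
  | a :: b :: c :: rest =>
      if a ++ b ++ c == "110" then some 0
      else (find110 (b :: c :: rest)).map (· + 1)
  | _ => none
termination_by cur.length
decreasing_by simp

-- cited by extract_x_alt_go's decreasing_by (a found index leaves room for the triple)
lemma find110_bound : ∀ (l : List String) (i : Nat), find110 l = some i → i + 3 ≤ l.length := by
  intro l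
  induction l using find110.induct with
  | case1 a b c rest hc =>
      intro i hi
      rw [find110, if_pos hc] at hi
      simp at hi
      simp [← hi]
  | case2 a b c rest hc ih =>
      intro i hi
      rw [find110, if_neg hc] at hi
      simp only [Option.map_eq_some_iff] at hi
      obtain ⟨j, hj, rfl⟩ := hi
      have := ih j hj
      simp at this ⊢
      omega
  | case3 l h =>
      intro i hi
      rcases l with _ | ⟨a, _ | ⟨b, _ | ⟨c, r⟩⟩⟩
      · simp [find110] at hi
      · simp [find110] at hi
      · simp [find110] at hi
      · exact absurd rfl (h a b c r)

-- B's while-loop: delete the leftmost matching triple, count, repeat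
def extract_x_alt_go (cur : List String) (x : Int) : List String × Int :=
  match h : find110 cur with
  | none => (cur, x)
  | some i => extract_x_alt_go (cur.take i ++ cur.drop (i + 3)) (x + 1)
termination_by cur.length
decreasing_by
  have := find110_bound cur i h
  simp only [List.length_append, List.length_take, List.length_drop]
  omega

def extract_x_alt (s_el : List String) : String × Int :=
  let r := extract_x_alt_go s_el 0
  (PySem.Str.join "" r.1, r.2)

-- ===== PRECONDITION & SPEC =====
def Spec_extract_x (s_el : List String) (out : String × Int) : Prop := out = extract_x_alt s_el
instance (s_el : List String) (out : String × Int) : Decidable (Spec_extract_x s_el out) := by unfold Spec_extract_x; infer_instance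

-- ===== CLAIM (what is proved, stated in full; the proofs are below) =====
def Claim_equal_extract_x : Prop := ∀ (s_el : List String), Dom_extract_x s_el → Spec_extract_x s_el (extract_x s_el)

-- ===== LEMMAS AND PROOFS =====

-- proof-only model of A's loop body: the stack held top-first
def pvStep (st : List String × Int) (s : String) : List String × Int :=
  match st with
  | (a :: b :: rest, x) =>
      if b ++ a ++ s == "110" then (rest, x + 1) else (s :: a :: b :: rest, x)
  | (out, x) => (s :: out, x)

-- A's join of three strings with empty separator is plain concatenation
lemma join_three (b a s : String) : PySem.Str.join "" [b, a, s] = b ++ a ++ s := by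
  simp [PySem.Str.join, PySem.Chars.join, List.intercalate]
  apply String.ext
  simp

-- one A-step on the reversed stack equals pvStep, reversed
lemma step_eq (rev : List String) (x : Int) (s : String) :
    extract_x_step (rev.reverse, x) s =
      ((pvStep (rev, x) s).1.reverse, (pvStep (rev, x) s).2) := by
  match rev with
  | [] => simp [extract_x_step, pvStep]
  | [a] => simp [extract_x_step, pvStep]
  | a :: b :: rest =>
    have hlen : ¬ (((a :: b :: rest).reverse ++ [s]).length < 3) := by simp
    have hslice : PySem.List.slice ((a :: b :: rest).reverse ++ [s]) (some (-3)) none = [b, a, s] := by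
      rw [PySem.List.slice_from_neg_ofNat _ 3 (by omega)]
      simp
    have hpops : (PySem.List.pyRange 0 3 1).foldl
        (fun l _ => ((PySem.List.pop? l (-1)).map Prod.snd).getD l)
        ((a :: b :: rest).reverse ++ [s]) = rest.reverse := by
      have h3 : PySem.List.pyRange 0 3 1 = [0, 1, 2] := by decide
      rw [h3]
      simp only [List.foldl_cons, List.foldl_nil, List.reverse_cons,
        PySem.List.pop?_last, Option.map_some, Option.getD_some]
    unfold extract_x_step pvStep
    simp only [if_neg hlen, hslice, hpops, join_three]
    by_cases h : (b ++ a ++ s == "110") = true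
    · simp [h]
    · simp [h]

-- A's fold equals the pvStep fold, with the stack reversed
lemma fold_eq (l : List String) (rev : List String) (x : Int) :
    l.foldl extract_x_step (rev.reverse, x) =
      ((l.foldl pvStep (rev, x)).1.reverse, (l.foldl pvStep (rev, x)).2) := by
  induction l generalizing rev x with
  | nil => simp
  | cons s l ih =>
      rw [List.foldl_cons, List.foldl_cons, step_eq]
      exact ih _ _

-- unfolding lemmas for find110 on short lists and on a cons-3 shape
lemma find110_nil : find110 [] = none := by simp [find110]
lemma find110_one (a : String) : find110 [a] = none := by simp [find110]
lemma find110_two (a b : String) : find110 [a, b] = none := by simp [find110]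
lemma find110_cons3 (a b c : String) (rest : List String) :
    find110 (a :: b :: c :: rest) =
      if a ++ b ++ c == "110" then some 0 else (find110 (b :: c :: rest)).map (· + 1) := by
  rw [find110]

-- unfolding lemmas for B's loop
lemma go_none (L : List String) (x : Int) (h : find110 L = none) :
    extract_x_alt_go L x = (L, x) := by
  rw [extract_x_alt_go]
  split <;> simp_all

lemma go_some (L : List String) (x : Int) (i : Nat) (h : find110 L = some i) :
    extract_x_alt_go L x = extract_x_alt_go (L.take i ++ L.drop (i + 3)) (x + 1) := by
  rw [extract_x_alt_go]
  split <;> simp_all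

-- dropping the head preserves the absence of a match
lemma find110_cons_none (a : String) (l : List String) :
    find110 (a :: l) = none → find110 l = none := by
  rcases l with _ | ⟨b, _ | ⟨c, rest⟩⟩
  · intro _; exact find110_nil
  · intro _; exact find110_one b
  · intro h
    rw [find110_cons3] at h
    by_cases hc : (a ++ b ++ c == "110") = true
    · rw [if_pos hc] at h; simp at h
    · rw [if_neg hc] at h
      exact Option.map_eq_none_iff.mp h

-- no match anywhere means no adjacent triple joins to "110"
lemma find110_no_triple :
    ∀ (U : List String) (x y z : String) (V : List String),
      find110 (U ++ x :: y :: z :: V) = none → ¬ (x ++ y ++ z = "110") := by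
  intro U
  induction U with
  | nil =>
      intro x y z V h hxyz
      rw [List.nil_append, find110_cons3, if_pos (by simp [hxyz])] at h
      simp at h
  | cons u U ih =>
      intro x y z V h
      exact ih x y z V (find110_cons_none u _ (by simpa using h))

-- a no-match region is absorbed by A's stack without any pop
lemma fold_nomatch :
    ∀ (L R : List String) (x : Int),
      find110 (R.reverse ++ L) = none →
      L.foldl pvStep (R, x) = ((R.reverse ++ L).reverse, x) := by
  intro L
  induction L with
  | nil => intro R x _; simp
  | cons s L ih =>
      intro R x h
      rcases R with _ | ⟨a, _ | ⟨b, rest⟩⟩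
      · rw [List.foldl_cons]
        show L.foldl pvStep ([s], x) = _
        have := ih [s] x (by simpa using h)
        simpa using this
      · rw [List.foldl_cons]
        show L.foldl pvStep ([s, a], x) = _
        have := ih [s, a] x (by simpa using h)
        simpa using this
      · have hnt : ¬ (b ++ a ++ s = "110") := by
          apply find110_no_triple rest.reverse b a s L
          have heq : (a :: b :: rest).reverse ++ s :: L = rest.reverse ++ b :: a :: s :: L := by
            simp
          rwa [heq] at h
        rw [List.foldl_cons]
        show L.foldl pvStep (pvStep (a :: b :: rest, x) s) = _
        rw [pvStep]
        rw [if_neg (by simpa using hnt)]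
        have := ih (s :: a :: b :: rest) x (by simpa using h)
        simpa using this

-- decomposition at the leftmost match
lemma find110_decomp :
    ∀ (L : List String) (i : Nat), find110 L = some i →
      ∃ P a b c S, L = P ++ a :: b :: c :: S ∧ P.length = i ∧ a ++ b ++ c = "110" ∧
        find110 (P ++ [a, b]) = none := by
  intro L
  induction L using find110.induct with
  | case1 a b c rest hc =>
      intro i hi
      rw [find110, if_pos hc] at hi
      simp at hi
      exact ⟨[], a, b, c, rest, rfl, by simp [← hi], by simpa using hc, by simp [find110_two]⟩
  | case2 a b c rest hc ih =>
      intro i hi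
      rw [find110, if_neg hc] at hi
      simp only [Option.map_eq_some_iff] at hi
      obtain ⟨j, hj, rfl⟩ := hi
      obtain ⟨P', x, y, z, S, hEq, hLen, hXYZ, hNone⟩ := ih j hj
      refine ⟨a :: P', x, y, z, S, by simp [hEq], by simp [hLen], hXYZ, ?_⟩
      -- a :: (P' ++ [x, y]) starts a :: b :: c :: …, with a++b++c ≠ "110" and no match later
      have hT : ∃ T, P' ++ [x, y] = b :: c :: T := by
        rcases P' with _ | ⟨p, _ | ⟨q, P''⟩⟩
        · simp at hEq
          exact ⟨[], by simp [hEq.1, hEq.2.1]⟩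
        · simp at hEq
          exact ⟨[y], by simp [hEq.1, hEq.2.1]⟩
        · simp at hEq
          exact ⟨P'' ++ [x, y], by simp [hEq.1, hEq.2.1]⟩
      obtain ⟨T, hTeq⟩ := hT
      show find110 (a :: (P' ++ [x, y])) = none
      rw [show a :: (P' ++ [x, y]) = a :: b :: c :: T by rw [hTeq], find110_cons3, if_neg hc]
      have hn : find110 (b :: c :: T) = none := by rw [← hTeq]; exact hNone
      simp [hn]
  | case3 l h =>
      intro i hi
      rcases l with _ | ⟨a, _ | ⟨b, _ | ⟨c, r⟩⟩⟩
      · simp [find110_nil] at hi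
      · simp [find110_one] at hi
      · simp [find110_two] at hi
      · exact absurd rfl (h a b c r)

-- a prefix of a no-match block (closed with [a, b]) is itself match-free
lemma prefix_nomatch :
    ∀ (P : List String) (a b : String), find110 (P ++ [a, b]) = none → find110 P = none := by
  intro P
  induction P using find110.induct with
  | case1 p q r rest hc =>
      intro a b hNone
      rw [show (p :: q :: r :: rest) ++ [a, b] = p :: q :: r :: (rest ++ [a, b]) by simp,
        find110_cons3, if_pos hc] at hNone
      simp at hNone
  | case2 p q r rest hc ih =>
      intro a b hNone
      rw [show (p :: q :: r :: rest) ++ [a, b] = p :: q :: r :: (rest ++ [a, b]) by simp,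
        find110_cons3, if_neg hc] at hNone
      have h1 : find110 ((q :: r :: rest) ++ [a, b]) = none := by
        simpa using Option.map_eq_none_iff.mp hNone
      rw [find110_cons3, if_neg hc]
      simp [ih a b h1]
  | case3 l h =>
      intro a b _
      rcases l with _ | ⟨p, _ | ⟨q, _ | ⟨r, rest⟩⟩⟩
      · exact find110_nil
      · exact find110_one p
      · exact find110_two p q
      · exact absurd rfl (h p q r rest)

-- A's stack fold computes B's delete-leftmost-until-fixpoint loop
lemma fold_eq_go : ∀ (L : List String) (x : Int),
    L.foldl pvStep ([], x) =
      ((extract_x_alt_go L x).1.reverse, (extract_x_alt_go L x).2) := by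
  intro L x
  induction L, x using extract_x_alt_go.induct with
  | case1 L x h =>
      rw [go_none L x h]
      have := fold_nomatch L [] x (by simpa using h)
      simpa using this
  | case2 L x i h ih =>
      rw [go_some L x i h]
      obtain ⟨P, a, b, c, S, rfl, hLen, hABC, hNone⟩ := find110_decomp L i h
      have hPnone : find110 P = none := prefix_nomatch P a b hNone
      have htake : (P ++ a :: b :: c :: S).take i = P := by
        rw [← hLen]
        simp
      have hdrop : (P ++ a :: b :: c :: S).drop (i + 3) = S := by
        have h1 : P ++ a :: b :: c :: S = (P ++ [a, b, c]) ++ S := by simp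
        have h2 : i + 3 = (P ++ [a, b, c]).length := by simp [← hLen]
        rw [h1, h2, List.drop_left]
      rw [htake, hdrop] at ih ⊢
      -- left side: absorb P ++ [a, b] without pops, pop on c, then continue with S
      have hPab : ((P ++ [a, b]).foldl pvStep ([], x)) = ((P ++ [a, b]).reverse, x) := by
        have := fold_nomatch (P ++ [a, b]) [] x (by simpa using hNone)
        simpa using this
      have hsplit : P ++ a :: b :: c :: S = (P ++ [a, b]) ++ c :: S := by simp
      rw [hsplit, List.foldl_append, hPab, List.foldl_cons]
      have hstep : pvStep ((P ++ [a, b]).reverse, x) c = (P.reverse, x + 1) := by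
        rw [show (P ++ [a, b]).reverse = b :: a :: P.reverse by simp, pvStep,
          if_pos (by simp [hABC])]
      rw [hstep]
      -- right side: fold over P ++ S from the empty stack with count x + 1
      have hPfold : (P.foldl pvStep ([], x + 1)) = (P.reverse, x + 1) := by
        have := fold_nomatch P [] (x + 1) (by simpa using hPnone)
        simpa using this
      rw [List.foldl_append, hPfold] at ih
      exact ih

-- ===== VERDICT (by name: the statement is the Claim_ definition above) =====
theorem extract_x_spec : Claim_equal_extract_x := by
  intro s_el _
  unfold Spec_extract_x extract_x extract_x_alt
  have h := fold_eq s_el [] 0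
  simp only [List.reverse_nil] at h
  rw [h, fold_eq_go]
  simp
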